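-- pv_equiv track=rewrite | github.com/Jessewb786/Silaty | hijra.py | absolute_to_gregorian
-- ===== SOURCE A (Python) =====
-- def gregorian_leap_year_p (year):
--    """Return 1 (True) if YEAR is a Gregorian leap year."""
--    if ((year % 4) == 0 and ((year % 100) or (year % 400) == 0)): return 1;
--    return 0;
--
-- def gregorian_day_number (year, month, day):
--    """Return the day number within the year of the date (year,month, day)"""
--    if month<3: return day + (31 * (month - 1))
--    return day + (31 * (month - 1)) - \
--    ((month << 2) + 23) // 10 + (gregorian_leap_year_p (year) & 1);
--
-- def gregorian_to_absolute (year, month, day):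
--    prior_years = year - 1
--    return gregorian_day_number (year, month, day) + \
--    (365 * prior_years + (prior_years >> 2)) - \
--    (prior_years // 100) + (prior_years // 400)
--
-- def absolute_to_gregorian(date):
--    """return (year month day) corresponding to the absolute DATE.
-- The absolute date is the number of days elapsed since the (imaginary)
-- Gregorian date Sunday, December 31, 1 BC."""
--
-- # See the footnote on page 384 of ``Calendrical Calculations, Part II:
-- # Three Historical Calendars'' by E. M. Reingold,  N. Dershowitz, and S. M.
-- # Clamen, Software--Practice and Experience, Volume 23, Number 4
-- # (April, 1993), pages 383-404 for an explanation.
--    d0 = date - 1;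
--    n400 = d0 // 146097;
--    d1 = d0 % 146097;
--    n100 = d1 // 36524;
--    d2 = d1 % 36524;
--    n4 = d2 // 1461;
--    d3 = d2 % 1461;
--    n1 = d3 // 365;
--    dd = (d3 % 365) + 1;
--    yy = ((400 * n400) + (100 * n100) + (n4 * 4) + n1);
--    if (n100 == 4) or (n1 == 4): return (yy, 12, 31);
--    yy=yy+1;
--    mm = 1;
--    while(date >= gregorian_to_absolute (yy,mm, 1)): mm+=1;
--    d=gregorian_to_absolute (yy, mm-1, 1);
--    return (yy, mm-1,date-d+1);
-- ===== SOURCE B (Python) =====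
-- def absolute_to_gregorian(date):
--     """return (year month day) corresponding to the absolute DATE.
-- Same year decomposition as before, but the month is found by walking a
-- precomputed month-length table instead of repeated absolute-date calls."""
--     d0 = date - 1
--     n400, d1 = divmod(d0, 146097)
--     n100, d2 = divmod(d1, 36524)
--     n4, d3 = divmod(d2, 1461)
--     n1 = d3 // 365
--     dd = d3 % 365 + 1
--     yy = 400 * n400 + 100 * n100 + 4 * n4 + n1
--     if n100 == 4 or n1 == 4:
--         return (yy, 12, 31)
--     yy += 1
--     leap = yy % 4 == 0 and (yy % 100 != 0 or yy % 400 == 0)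
--     months = (31, 29 if leap else 28, 31, 30, 31, 30, 31, 31, 30, 31, 30, 31)
--     mm = 1
--     for ln in months:
--         if dd <= ln:
--             return (yy, mm, dd)
--         dd -= ln
--         mm += 1
-- ===== Notes on version B (the rewrite author's own statement) =====
-- stated objective: alternative
-- what changed: B keeps A's year decomposition but replaces A's month-search loop, which recomputes a full absolute day number (gregorian_to_absolute) for every candidate month, with a single walk over a precomputed table of month lengths, subtracting each length from the day of year.
import Mathlib
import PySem

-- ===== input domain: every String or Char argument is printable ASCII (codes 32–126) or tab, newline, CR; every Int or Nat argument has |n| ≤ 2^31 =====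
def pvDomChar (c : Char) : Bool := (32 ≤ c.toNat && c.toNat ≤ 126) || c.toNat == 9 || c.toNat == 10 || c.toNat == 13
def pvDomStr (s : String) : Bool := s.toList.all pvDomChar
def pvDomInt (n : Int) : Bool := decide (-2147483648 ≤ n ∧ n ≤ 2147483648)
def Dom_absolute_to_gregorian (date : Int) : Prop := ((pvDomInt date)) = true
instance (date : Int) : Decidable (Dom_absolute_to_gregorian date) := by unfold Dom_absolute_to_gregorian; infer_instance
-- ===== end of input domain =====

-- B replaces A's month search (which recomputes an absolute day number for every candidate
-- month) with a single walk over a precomputed month-length table; objective: alternative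
-- decomposition of the same computation.

-- ===== PORT A =====
def gregorian_leap_year_p (year : Int) : Int :=
  if PySem.Int.mod year 4 = 0 ∧ (PySem.Int.mod year 100 ≠ 0 ∨ PySem.Int.mod year 400 = 0)
  then 1 else 0

def gregorian_day_number (year month day : Int) : Int :=
  if month < 3 then day + 31 * (month - 1)
  else day + 31 * (month - 1)
       - PySem.Int.floordiv ((month <<< (2:Nat)) + 23) 10
       + PySem.Int.band (gregorian_leap_year_p year) 1

def gregorian_to_absolute (year month day : Int) : Int :=
  let prior_years := year - 1
  gregorian_day_number year month day
    + (365 * prior_years + (prior_years >>> (2:Nat)))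
    - PySem.Int.floordiv prior_years 100 + PySem.Int.floordiv prior_years 400

-- the 'while(date >= gregorian_to_absolute(yy,mm,1)): mm+=1' loop; the fuel argument only
-- makes the recursion structural and is never exhausted (the loop always stops earlier)
def a2g_loop (date yy : Int) : Nat → Int → Int
  | 0, mm => mm
  | fuel + 1, mm =>
      if gregorian_to_absolute yy mm 1 ≤ date then a2g_loop date yy fuel (mm + 1) else mm

def absolute_to_gregorian (date : Int) : Int × Int × Int :=
  let d0 := date - 1
  let n400 := PySem.Int.floordiv d0 146097
  let d1 := PySem.Int.mod d0 146097
  let n100 := PySem.Int.floordiv d1 36524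
  let d2 := PySem.Int.mod d1 36524
  let n4 := PySem.Int.floordiv d2 1461
  let d3 := PySem.Int.mod d2 1461
  let n1 := PySem.Int.floordiv d3 365
  let dd := PySem.Int.mod d3 365 + 1
  let yy := 400 * n400 + 100 * n100 + 4 * n4 + n1
  if n100 = 4 ∨ n1 = 4 then (yy, 12, 31)
  else
    let yy := yy + 1
    let mm := a2g_loop date yy 20 1
    let d := gregorian_to_absolute yy (mm - 1) 1
    (yy, mm - 1, date - d + 1)

-- ===== PORT B =====
-- walk the month-length table, subtracting lengths until the day of year fits
def b_walk : List Int → Int → Int → Int × Int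
  | [], mm, dd => (mm, dd)
  | ln :: rest, mm, dd => if dd ≤ ln then (mm, dd) else b_walk rest (mm + 1) (dd - ln)

def absolute_to_gregorian_alt (date : Int) : Int × Int × Int :=
  let d0 := date - 1
  let n400 := PySem.Int.floordiv d0 146097
  let d1 := PySem.Int.mod d0 146097
  let n100 := PySem.Int.floordiv d1 36524
  let d2 := PySem.Int.mod d1 36524
  let n4 := PySem.Int.floordiv d2 1461
  let d3 := PySem.Int.mod d2 1461
  let n1 := PySem.Int.floordiv d3 365
  let dd := PySem.Int.mod d3 365 + 1
  let yy := 400 * n400 + 100 * n100 + 4 * n4 + n1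
  if n100 = 4 ∨ n1 = 4 then (yy, 12, 31)
  else
    let yy := yy + 1
    let leap : Bool :=
      PySem.Int.mod yy 4 = 0 ∧ (PySem.Int.mod yy 100 ≠ 0 ∨ PySem.Int.mod yy 400 = 0)
    let months : List Int :=
      [31, if leap then 29 else 28, 31, 30, 31, 30, 31, 31, 30, 31, 30, 31]
    let p := b_walk months 1 dd
    (yy, p.1, p.2)

-- ===== PRECONDITION & SPEC =====
def Spec_absolute_to_gregorian (date : Int) (out : Int × Int × Int) : Prop := out = absolute_to_gregorian_alt date
instance (date : Int) (out : Int × Int × Int) : Decidable (Spec_absolute_to_gregorian date out) := by unfold Spec_absolute_to_gregorian; infer_instance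

-- ===== CLAIM (what is proved, stated in full; the proofs are below) =====
def Claim_equal_absolute_to_gregorian : Prop := ∀ (date : Int), Dom_absolute_to_gregorian date → Spec_absolute_to_gregorian date (absolute_to_gregorian date)

-- ===== LEMMAS AND PROOFS =====

theorem g2a_split (y m : Int) :
    gregorian_to_absolute y m 1 =
      gregorian_day_number y m 1 + (gregorian_to_absolute y 1 1 - 1) := by
  unfold gregorian_to_absolute
  have h1 : gregorian_day_number y 1 1 = 1 := by
    unfold gregorian_day_number; norm_num
  rw [h1]; ring
theorem dayno_eq (y m L : Int) (hL : gregorian_leap_year_p y = L) (h01 : L = 0 ∨ L = 1) :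
    gregorian_day_number y m 1 =
      if m < 3 then 1 + 31 * (m - 1) else 1 + 31 * (m - 1) - (4 * m + 23) / 10 + L := by
  unfold gregorian_day_number
  rw [hL]
  have hs : m <<< (2:Nat) = m * 4 := by simp [Int.shiftLeft_eq]
  have hf : PySem.Int.floordiv (m <<< (2:Nat) + 23) 10 = (4 * m + 23) / 10 := by
    rw [PySem.Int.floordiv_eq_ediv_of_pos (by norm_num), hs]; ring_nf
  have hb : PySem.Int.band L 1 = L := by rcases h01 with h | h <;> subst h <;> decide
  rw [hf, hb]

theorem loop_step (date y dd : Int) (hdate : date = gregorian_to_absolute y 1 1 + dd - 1) :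
    ∀ (f : Nat) (mm : Int), a2g_loop date y (f + 1) mm =
      if gregorian_day_number y mm 1 ≤ dd then a2g_loop date y f (mm + 1) else mm := by
  intro f mm
  have hcond : gregorian_to_absolute y mm 1 ≤ date ↔ gregorian_day_number y mm 1 ≤ dd := by
    rw [g2a_split, hdate]; constructor <;> intro <;> omega
  rw [a2g_loop]
  by_cases hc : gregorian_day_number y mm 1 ≤ dd
  · rw [if_pos (hcond.mpr hc), if_pos hc]
  · rw [if_neg (fun h => hc (hcond.mp h)), if_neg hc]

theorem fin_eq (date y dd m : Int) (hdate : date = gregorian_to_absolute y 1 1 + dd - 1) :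
    date - gregorian_to_absolute y m 1 + 1 = dd - gregorian_day_number y m 1 + 1 := by
  rw [g2a_split, hdate]; ring

theorem dval1 (y L : Int) (hL : gregorian_leap_year_p y = L) (h01 : L = 0 ∨ L = 1) :
    gregorian_day_number y 1 1 = 1 := by
  rw [dayno_eq y 1 L hL h01]; norm_num

theorem dval2 (y L : Int) (hL : gregorian_leap_year_p y = L) (h01 : L = 0 ∨ L = 1) :
    gregorian_day_number y 2 1 = 32 := by
  rw [dayno_eq y 2 L hL h01]; norm_num

theorem dval3 (y L : Int) (hL : gregorian_leap_year_p y = L) (h01 : L = 0 ∨ L = 1) :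
    gregorian_day_number y 3 1 = 60 + L := by
  rw [dayno_eq y 3 L hL h01]; norm_num

theorem dval4 (y L : Int) (hL : gregorian_leap_year_p y = L) (h01 : L = 0 ∨ L = 1) :
    gregorian_day_number y 4 1 = 91 + L := by
  rw [dayno_eq y 4 L hL h01]; norm_num

theorem dval5 (y L : Int) (hL : gregorian_leap_year_p y = L) (h01 : L = 0 ∨ L = 1) :
    gregorian_day_number y 5 1 = 121 + L := by
  rw [dayno_eq y 5 L hL h01]; norm_num

theorem dval6 (y L : Int) (hL : gregorian_leap_year_p y = L) (h01 : L = 0 ∨ L = 1) :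
    gregorian_day_number y 6 1 = 152 + L := by
  rw [dayno_eq y 6 L hL h01]; norm_num

theorem dval7 (y L : Int) (hL : gregorian_leap_year_p y = L) (h01 : L = 0 ∨ L = 1) :
    gregorian_day_number y 7 1 = 182 + L := by
  rw [dayno_eq y 7 L hL h01]; norm_num

theorem dval8 (y L : Int) (hL : gregorian_leap_year_p y = L) (h01 : L = 0 ∨ L = 1) :
    gregorian_day_number y 8 1 = 213 + L := by
  rw [dayno_eq y 8 L hL h01]; norm_num

theorem dval9 (y L : Int) (hL : gregorian_leap_year_p y = L) (h01 : L = 0 ∨ L = 1) :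
    gregorian_day_number y 9 1 = 244 + L := by
  rw [dayno_eq y 9 L hL h01]; norm_num

theorem dval10 (y L : Int) (hL : gregorian_leap_year_p y = L) (h01 : L = 0 ∨ L = 1) :
    gregorian_day_number y 10 1 = 274 + L := by
  rw [dayno_eq y 10 L hL h01]; norm_num

theorem dval11 (y L : Int) (hL : gregorian_leap_year_p y = L) (h01 : L = 0 ∨ L = 1) :
    gregorian_day_number y 11 1 = 305 + L := by
  rw [dayno_eq y 11 L hL h01]; norm_num

theorem dval12 (y L : Int) (hL : gregorian_leap_year_p y = L) (h01 : L = 0 ∨ L = 1) :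
    gregorian_day_number y 12 1 = 335 + L := by
  rw [dayno_eq y 12 L hL h01]; norm_num

theorem dval13 (y L : Int) (hL : gregorian_leap_year_p y = L) (h01 : L = 0 ∨ L = 1) :
    gregorian_day_number y 13 1 = 366 + L := by
  rw [dayno_eq y 13 L hL h01]; norm_num

set_option maxHeartbeats 1000000 in
theorem a2g_case1 (date y dd L : Int) (hL : gregorian_leap_year_p y = L)
    (h01 : L = 0 ∨ L = 1) (h1 : 1 ≤ dd) (h2 : dd ≤ 365)
    (hdate : date = gregorian_to_absolute y 1 1 + dd - 1)
    (hhi : dd < 32) :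
    ((a2g_loop date y 20 1 - 1),
      (date - gregorian_to_absolute y (a2g_loop date y 20 1 - 1) 1 + 1)) =
    b_walk [31, 28 + L, 31, 30, 31, 30, 31, 31, 30, 31, 30, 31] 1 dd := by
  have step := loop_step date y dd hdate
  have hrun : a2g_loop date y 20 1 = 2 := by
    rw [show (20:Nat) = 19 + 1 from rfl, step, dval1 y L hL h01, if_pos (by omega)]
    rw [show ((1:Int) + 1) = 2 by norm_num]
    rw [show (19:Nat) = 18 + 1 from rfl, step, dval2 y L hL h01, if_neg (by omega)]
  have hw : b_walk [31, 28 + L, 31, 30, 31, 30, 31, 31, 30, 31, 30, 31] 1 dd = (1, dd) := by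
    rw [b_walk, if_pos (by omega)]
    all_goals simp only [Prod.mk.injEq, true_and, and_true]
    all_goals omega
  rw [hrun, hw, show ((2:Int) - 1) = 1 by norm_num, fin_eq date y dd 1 hdate, dval1 y L hL h01]
  simp only [Prod.mk.injEq, true_and, and_true]
  omega

set_option maxHeartbeats 1000000 in
theorem a2g_case2 (date y dd L : Int) (hL : gregorian_leap_year_p y = L)
    (h01 : L = 0 ∨ L = 1) (h1 : 1 ≤ dd) (h2 : dd ≤ 365)
    (hdate : date = gregorian_to_absolute y 1 1 + dd - 1)
    (hlo : 32 ≤ dd) (hhi : dd < 60 + L) :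
    ((a2g_loop date y 20 1 - 1),
      (date - gregorian_to_absolute y (a2g_loop date y 20 1 - 1) 1 + 1)) =
    b_walk [31, 28 + L, 31, 30, 31, 30, 31, 31, 30, 31, 30, 31] 1 dd := by
  have step := loop_step date y dd hdate
  have hrun : a2g_loop date y 20 1 = 3 := by
    rw [show (20:Nat) = 19 + 1 from rfl, step, dval1 y L hL h01, if_pos (by omega)]
    rw [show ((1:Int) + 1) = 2 by norm_num]
    rw [show (19:Nat) = 18 + 1 from rfl, step, dval2 y L hL h01, if_pos (by omega)]
    rw [show ((2:Int) + 1) = 3 by norm_num]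
    rw [show (18:Nat) = 17 + 1 from rfl, step, dval3 y L hL h01, if_neg (by omega)]
  have hw : b_walk [31, 28 + L, 31, 30, 31, 30, 31, 31, 30, 31, 30, 31] 1 dd = (2, dd - 31) := by
    rw [b_walk, if_neg (by omega), b_walk, if_pos (by omega)]
    all_goals simp only [Prod.mk.injEq, true_and, and_true]
    all_goals omega
  rw [hrun, hw, show ((3:Int) - 1) = 2 by norm_num, fin_eq date y dd 2 hdate, dval2 y L hL h01]
  simp only [Prod.mk.injEq, true_and, and_true]
  omega

set_option maxHeartbeats 1000000 in
theorem a2g_case3 (date y dd L : Int) (hL : gregorian_leap_year_p y = L)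
    (h01 : L = 0 ∨ L = 1) (h1 : 1 ≤ dd) (h2 : dd ≤ 365)
    (hdate : date = gregorian_to_absolute y 1 1 + dd - 1)
    (hlo : 60 + L ≤ dd) (hhi : dd < 91 + L) :
    ((a2g_loop date y 20 1 - 1),
      (date - gregorian_to_absolute y (a2g_loop date y 20 1 - 1) 1 + 1)) =
    b_walk [31, 28 + L, 31, 30, 31, 30, 31, 31, 30, 31, 30, 31] 1 dd := by
  have step := loop_step date y dd hdate
  have hrun : a2g_loop date y 20 1 = 4 := by
    rw [show (20:Nat) = 19 + 1 from rfl, step, dval1 y L hL h01, if_pos (by omega)]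
    rw [show ((1:Int) + 1) = 2 by norm_num]
    rw [show (19:Nat) = 18 + 1 from rfl, step, dval2 y L hL h01, if_pos (by omega)]
    rw [show ((2:Int) + 1) = 3 by norm_num]
    rw [show (18:Nat) = 17 + 1 from rfl, step, dval3 y L hL h01, if_pos (by omega)]
    rw [show ((3:Int) + 1) = 4 by norm_num]
    rw [show (17:Nat) = 16 + 1 from rfl, step, dval4 y L hL h01, if_neg (by omega)]
  have hw : b_walk [31, 28 + L, 31, 30, 31, 30, 31, 31, 30, 31, 30, 31] 1 dd = (3, dd - (59 + L)) := by
    rw [b_walk, if_neg (by omega), b_walk, if_neg (by omega), b_walk, if_pos (by omega)]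
    all_goals simp only [Prod.mk.injEq, true_and, and_true]
    all_goals omega
  rw [hrun, hw, show ((4:Int) - 1) = 3 by norm_num, fin_eq date y dd 3 hdate, dval3 y L hL h01]
  simp only [Prod.mk.injEq, true_and, and_true]
  omega

set_option maxHeartbeats 1000000 in
theorem a2g_case4 (date y dd L : Int) (hL : gregorian_leap_year_p y = L)
    (h01 : L = 0 ∨ L = 1) (h1 : 1 ≤ dd) (h2 : dd ≤ 365)
    (hdate : date = gregorian_to_absolute y 1 1 + dd - 1)
    (hlo : 91 + L ≤ dd) (hhi : dd < 121 + L) :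
    ((a2g_loop date y 20 1 - 1),
      (date - gregorian_to_absolute y (a2g_loop date y 20 1 - 1) 1 + 1)) =
    b_walk [31, 28 + L, 31, 30, 31, 30, 31, 31, 30, 31, 30, 31] 1 dd := by
  have step := loop_step date y dd hdate
  have hrun : a2g_loop date y 20 1 = 5 := by
    rw [show (20:Nat) = 19 + 1 from rfl, step, dval1 y L hL h01, if_pos (by omega)]
    rw [show ((1:Int) + 1) = 2 by norm_num]
    rw [show (19:Nat) = 18 + 1 from rfl, step, dval2 y L hL h01, if_pos (by omega)]
    rw [show ((2:Int) + 1) = 3 by norm_num]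
    rw [show (18:Nat) = 17 + 1 from rfl, step, dval3 y L hL h01, if_pos (by omega)]
    rw [show ((3:Int) + 1) = 4 by norm_num]
    rw [show (17:Nat) = 16 + 1 from rfl, step, dval4 y L hL h01, if_pos (by omega)]
    rw [show ((4:Int) + 1) = 5 by norm_num]
    rw [show (16:Nat) = 15 + 1 from rfl, step, dval5 y L hL h01, if_neg (by omega)]
  have hw : b_walk [31, 28 + L, 31, 30, 31, 30, 31, 31, 30, 31, 30, 31] 1 dd = (4, dd - (90 + L)) := by
    rw [b_walk, if_neg (by omega), b_walk, if_neg (by omega), b_walk, if_neg (by omega), b_walk, if_pos (by omega)]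
    all_goals simp only [Prod.mk.injEq, true_and, and_true]
    all_goals omega
  rw [hrun, hw, show ((5:Int) - 1) = 4 by norm_num, fin_eq date y dd 4 hdate, dval4 y L hL h01]
  simp only [Prod.mk.injEq, true_and, and_true]
  omega

set_option maxHeartbeats 1000000 in
theorem a2g_case5 (date y dd L : Int) (hL : gregorian_leap_year_p y = L)
    (h01 : L = 0 ∨ L = 1) (h1 : 1 ≤ dd) (h2 : dd ≤ 365)
    (hdate : date = gregorian_to_absolute y 1 1 + dd - 1)
    (hlo : 121 + L ≤ dd) (hhi : dd < 152 + L) :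
    ((a2g_loop date y 20 1 - 1),
      (date - gregorian_to_absolute y (a2g_loop date y 20 1 - 1) 1 + 1)) =
    b_walk [31, 28 + L, 31, 30, 31, 30, 31, 31, 30, 31, 30, 31] 1 dd := by
  have step := loop_step date y dd hdate
  have hrun : a2g_loop date y 20 1 = 6 := by
    rw [show (20:Nat) = 19 + 1 from rfl, step, dval1 y L hL h01, if_pos (by omega)]
    rw [show ((1:Int) + 1) = 2 by norm_num]
    rw [show (19:Nat) = 18 + 1 from rfl, step, dval2 y L hL h01, if_pos (by omega)]
    rw [show ((2:Int) + 1) = 3 by norm_num]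
    rw [show (18:Nat) = 17 + 1 from rfl, step, dval3 y L hL h01, if_pos (by omega)]
    rw [show ((3:Int) + 1) = 4 by norm_num]
    rw [show (17:Nat) = 16 + 1 from rfl, step, dval4 y L hL h01, if_pos (by omega)]
    rw [show ((4:Int) + 1) = 5 by norm_num]
    rw [show (16:Nat) = 15 + 1 from rfl, step, dval5 y L hL h01, if_pos (by omega)]
    rw [show ((5:Int) + 1) = 6 by norm_num]
    rw [show (15:Nat) = 14 + 1 from rfl, step, dval6 y L hL h01, if_neg (by omega)]
  have hw : b_walk [31, 28 + L, 31, 30, 31, 30, 31, 31, 30, 31, 30, 31] 1 dd = (5, dd - (120 + L)) := by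
    rw [b_walk, if_neg (by omega), b_walk, if_neg (by omega), b_walk, if_neg (by omega), b_walk, if_neg (by omega), b_walk, if_pos (by omega)]
    all_goals simp only [Prod.mk.injEq, true_and, and_true]
    all_goals omega
  rw [hrun, hw, show ((6:Int) - 1) = 5 by norm_num, fin_eq date y dd 5 hdate, dval5 y L hL h01]
  simp only [Prod.mk.injEq, true_and, and_true]
  omega

set_option maxHeartbeats 1000000 in
theorem a2g_case6 (date y dd L : Int) (hL : gregorian_leap_year_p y = L)
    (h01 : L = 0 ∨ L = 1) (h1 : 1 ≤ dd) (h2 : dd ≤ 365)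
    (hdate : date = gregorian_to_absolute y 1 1 + dd - 1)
    (hlo : 152 + L ≤ dd) (hhi : dd < 182 + L) :
    ((a2g_loop date y 20 1 - 1),
      (date - gregorian_to_absolute y (a2g_loop date y 20 1 - 1) 1 + 1)) =
    b_walk [31, 28 + L, 31, 30, 31, 30, 31, 31, 30, 31, 30, 31] 1 dd := by
  have step := loop_step date y dd hdate
  have hrun : a2g_loop date y 20 1 = 7 := by
    rw [show (20:Nat) = 19 + 1 from rfl, step, dval1 y L hL h01, if_pos (by omega)]
    rw [show ((1:Int) + 1) = 2 by norm_num]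
    rw [show (19:Nat) = 18 + 1 from rfl, step, dval2 y L hL h01, if_pos (by omega)]
    rw [show ((2:Int) + 1) = 3 by norm_num]
    rw [show (18:Nat) = 17 + 1 from rfl, step, dval3 y L hL h01, if_pos (by omega)]
    rw [show ((3:Int) + 1) = 4 by norm_num]
    rw [show (17:Nat) = 16 + 1 from rfl, step, dval4 y L hL h01, if_pos (by omega)]
    rw [show ((4:Int) + 1) = 5 by norm_num]
    rw [show (16:Nat) = 15 + 1 from rfl, step, dval5 y L hL h01, if_pos (by omega)]
    rw [show ((5:Int) + 1) = 6 by norm_num]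
    rw [show (15:Nat) = 14 + 1 from rfl, step, dval6 y L hL h01, if_pos (by omega)]
    rw [show ((6:Int) + 1) = 7 by norm_num]
    rw [show (14:Nat) = 13 + 1 from rfl, step, dval7 y L hL h01, if_neg (by omega)]
  have hw : b_walk [31, 28 + L, 31, 30, 31, 30, 31, 31, 30, 31, 30, 31] 1 dd = (6, dd - (151 + L)) := by
    rw [b_walk, if_neg (by omega), b_walk, if_neg (by omega), b_walk, if_neg (by omega), b_walk, if_neg (by omega), b_walk, if_neg (by omega), b_walk, if_pos (by omega)]
    all_goals simp only [Prod.mk.injEq, true_and, and_true]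
    all_goals omega
  rw [hrun, hw, show ((7:Int) - 1) = 6 by norm_num, fin_eq date y dd 6 hdate, dval6 y L hL h01]
  simp only [Prod.mk.injEq, true_and, and_true]
  omega

set_option maxHeartbeats 1000000 in
theorem a2g_case7 (date y dd L : Int) (hL : gregorian_leap_year_p y = L)
    (h01 : L = 0 ∨ L = 1) (h1 : 1 ≤ dd) (h2 : dd ≤ 365)
    (hdate : date = gregorian_to_absolute y 1 1 + dd - 1)
    (hlo : 182 + L ≤ dd) (hhi : dd < 213 + L) :
    ((a2g_loop date y 20 1 - 1),
      (date - gregorian_to_absolute y (a2g_loop date y 20 1 - 1) 1 + 1)) =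
    b_walk [31, 28 + L, 31, 30, 31, 30, 31, 31, 30, 31, 30, 31] 1 dd := by
  have step := loop_step date y dd hdate
  have hrun : a2g_loop date y 20 1 = 8 := by
    rw [show (20:Nat) = 19 + 1 from rfl, step, dval1 y L hL h01, if_pos (by omega)]
    rw [show ((1:Int) + 1) = 2 by norm_num]
    rw [show (19:Nat) = 18 + 1 from rfl, step, dval2 y L hL h01, if_pos (by omega)]
    rw [show ((2:Int) + 1) = 3 by norm_num]
    rw [show (18:Nat) = 17 + 1 from rfl, step, dval3 y L hL h01, if_pos (by omega)]
    rw [show ((3:Int) + 1) = 4 by norm_num]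
    rw [show (17:Nat) = 16 + 1 from rfl, step, dval4 y L hL h01, if_pos (by omega)]
    rw [show ((4:Int) + 1) = 5 by norm_num]
    rw [show (16:Nat) = 15 + 1 from rfl, step, dval5 y L hL h01, if_pos (by omega)]
    rw [show ((5:Int) + 1) = 6 by norm_num]
    rw [show (15:Nat) = 14 + 1 from rfl, step, dval6 y L hL h01, if_pos (by omega)]
    rw [show ((6:Int) + 1) = 7 by norm_num]
    rw [show (14:Nat) = 13 + 1 from rfl, step, dval7 y L hL h01, if_pos (by omega)]
    rw [show ((7:Int) + 1) = 8 by norm_num]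
    rw [show (13:Nat) = 12 + 1 from rfl, step, dval8 y L hL h01, if_neg (by omega)]
  have hw : b_walk [31, 28 + L, 31, 30, 31, 30, 31, 31, 30, 31, 30, 31] 1 dd = (7, dd - (181 + L)) := by
    rw [b_walk, if_neg (by omega), b_walk, if_neg (by omega), b_walk, if_neg (by omega), b_walk, if_neg (by omega), b_walk, if_neg (by omega), b_walk, if_neg (by omega), b_walk, if_pos (by omega)]
    all_goals simp only [Prod.mk.injEq, true_and, and_true]
    all_goals omega
  rw [hrun, hw, show ((8:Int) - 1) = 7 by norm_num, fin_eq date y dd 7 hdate, dval7 y L hL h01]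
  simp only [Prod.mk.injEq, true_and, and_true]
  omega

set_option maxHeartbeats 1000000 in
theorem a2g_case8 (date y dd L : Int) (hL : gregorian_leap_year_p y = L)
    (h01 : L = 0 ∨ L = 1) (h1 : 1 ≤ dd) (h2 : dd ≤ 365)
    (hdate : date = gregorian_to_absolute y 1 1 + dd - 1)
    (hlo : 213 + L ≤ dd) (hhi : dd < 244 + L) :
    ((a2g_loop date y 20 1 - 1),
      (date - gregorian_to_absolute y (a2g_loop date y 20 1 - 1) 1 + 1)) =
    b_walk [31, 28 + L, 31, 30, 31, 30, 31, 31, 30, 31, 30, 31] 1 dd := by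
  have step := loop_step date y dd hdate
  have hrun : a2g_loop date y 20 1 = 9 := by
    rw [show (20:Nat) = 19 + 1 from rfl, step, dval1 y L hL h01, if_pos (by omega)]
    rw [show ((1:Int) + 1) = 2 by norm_num]
    rw [show (19:Nat) = 18 + 1 from rfl, step, dval2 y L hL h01, if_pos (by omega)]
    rw [show ((2:Int) + 1) = 3 by norm_num]
    rw [show (18:Nat) = 17 + 1 from rfl, step, dval3 y L hL h01, if_pos (by omega)]
    rw [show ((3:Int) + 1) = 4 by norm_num]
    rw [show (17:Nat) = 16 + 1 from rfl, step, dval4 y L hL h01, if_pos (by omega)]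
    rw [show ((4:Int) + 1) = 5 by norm_num]
    rw [show (16:Nat) = 15 + 1 from rfl, step, dval5 y L hL h01, if_pos (by omega)]
    rw [show ((5:Int) + 1) = 6 by norm_num]
    rw [show (15:Nat) = 14 + 1 from rfl, step, dval6 y L hL h01, if_pos (by omega)]
    rw [show ((6:Int) + 1) = 7 by norm_num]
    rw [show (14:Nat) = 13 + 1 from rfl, step, dval7 y L hL h01, if_pos (by omega)]
    rw [show ((7:Int) + 1) = 8 by norm_num]
    rw [show (13:Nat) = 12 + 1 from rfl, step, dval8 y L hL h01, if_pos (by omega)]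
    rw [show ((8:Int) + 1) = 9 by norm_num]
    rw [show (12:Nat) = 11 + 1 from rfl, step, dval9 y L hL h01, if_neg (by omega)]
  have hw : b_walk [31, 28 + L, 31, 30, 31, 30, 31, 31, 30, 31, 30, 31] 1 dd = (8, dd - (212 + L)) := by
    rw [b_walk, if_neg (by omega), b_walk, if_neg (by omega), b_walk, if_neg (by omega), b_walk, if_neg (by omega), b_walk, if_neg (by omega), b_walk, if_neg (by omega), b_walk, if_neg (by omega), b_walk, if_pos (by omega)]
    all_goals simp only [Prod.mk.injEq, true_and, and_true]
    all_goals omega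
  rw [hrun, hw, show ((9:Int) - 1) = 8 by norm_num, fin_eq date y dd 8 hdate, dval8 y L hL h01]
  simp only [Prod.mk.injEq, true_and, and_true]
  omega

set_option maxHeartbeats 1000000 in
theorem a2g_case9 (date y dd L : Int) (hL : gregorian_leap_year_p y = L)
    (h01 : L = 0 ∨ L = 1) (h1 : 1 ≤ dd) (h2 : dd ≤ 365)
    (hdate : date = gregorian_to_absolute y 1 1 + dd - 1)
    (hlo : 244 + L ≤ dd) (hhi : dd < 274 + L) :
    ((a2g_loop date y 20 1 - 1),
      (date - gregorian_to_absolute y (a2g_loop date y 20 1 - 1) 1 + 1)) =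
    b_walk [31, 28 + L, 31, 30, 31, 30, 31, 31, 30, 31, 30, 31] 1 dd := by
  have step := loop_step date y dd hdate
  have hrun : a2g_loop date y 20 1 = 10 := by
    rw [show (20:Nat) = 19 + 1 from rfl, step, dval1 y L hL h01, if_pos (by omega)]
    rw [show ((1:Int) + 1) = 2 by norm_num]
    rw [show (19:Nat) = 18 + 1 from rfl, step, dval2 y L hL h01, if_pos (by omega)]
    rw [show ((2:Int) + 1) = 3 by norm_num]
    rw [show (18:Nat) = 17 + 1 from rfl, step, dval3 y L hL h01, if_pos (by omega)]
    rw [show ((3:Int) + 1) = 4 by norm_num]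
    rw [show (17:Nat) = 16 + 1 from rfl, step, dval4 y L hL h01, if_pos (by omega)]
    rw [show ((4:Int) + 1) = 5 by norm_num]
    rw [show (16:Nat) = 15 + 1 from rfl, step, dval5 y L hL h01, if_pos (by omega)]
    rw [show ((5:Int) + 1) = 6 by norm_num]
    rw [show (15:Nat) = 14 + 1 from rfl, step, dval6 y L hL h01, if_pos (by omega)]
    rw [show ((6:Int) + 1) = 7 by norm_num]
    rw [show (14:Nat) = 13 + 1 from rfl, step, dval7 y L hL h01, if_pos (by omega)]
    rw [show ((7:Int) + 1) = 8 by norm_num]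
    rw [show (13:Nat) = 12 + 1 from rfl, step, dval8 y L hL h01, if_pos (by omega)]
    rw [show ((8:Int) + 1) = 9 by norm_num]
    rw [show (12:Nat) = 11 + 1 from rfl, step, dval9 y L hL h01, if_pos (by omega)]
    rw [show ((9:Int) + 1) = 10 by norm_num]
    rw [show (11:Nat) = 10 + 1 from rfl, step, dval10 y L hL h01, if_neg (by omega)]
  have hw : b_walk [31, 28 + L, 31, 30, 31, 30, 31, 31, 30, 31, 30, 31] 1 dd = (9, dd - (243 + L)) := by
    rw [b_walk, if_neg (by omega), b_walk, if_neg (by omega), b_walk, if_neg (by omega), b_walk, if_neg (by omega), b_walk, if_neg (by omega), b_walk, if_neg (by omega), b_walk, if_neg (by omega), b_walk, if_neg (by omega), b_walk, if_pos (by omega)]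
    all_goals simp only [Prod.mk.injEq, true_and, and_true]
    all_goals omega
  rw [hrun, hw, show ((10:Int) - 1) = 9 by norm_num, fin_eq date y dd 9 hdate, dval9 y L hL h01]
  simp only [Prod.mk.injEq, true_and, and_true]
  omega

set_option maxHeartbeats 1000000 in
theorem a2g_case10 (date y dd L : Int) (hL : gregorian_leap_year_p y = L)
    (h01 : L = 0 ∨ L = 1) (h1 : 1 ≤ dd) (h2 : dd ≤ 365)
    (hdate : date = gregorian_to_absolute y 1 1 + dd - 1)
    (hlo : 274 + L ≤ dd) (hhi : dd < 305 + L) :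
    ((a2g_loop date y 20 1 - 1),
      (date - gregorian_to_absolute y (a2g_loop date y 20 1 - 1) 1 + 1)) =
    b_walk [31, 28 + L, 31, 30, 31, 30, 31, 31, 30, 31, 30, 31] 1 dd := by
  have step := loop_step date y dd hdate
  have hrun : a2g_loop date y 20 1 = 11 := by
    rw [show (20:Nat) = 19 + 1 from rfl, step, dval1 y L hL h01, if_pos (by omega)]
    rw [show ((1:Int) + 1) = 2 by norm_num]
    rw [show (19:Nat) = 18 + 1 from rfl, step, dval2 y L hL h01, if_pos (by omega)]
    rw [show ((2:Int) + 1) = 3 by norm_num]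
    rw [show (18:Nat) = 17 + 1 from rfl, step, dval3 y L hL h01, if_pos (by omega)]
    rw [show ((3:Int) + 1) = 4 by norm_num]
    rw [show (17:Nat) = 16 + 1 from rfl, step, dval4 y L hL h01, if_pos (by omega)]
    rw [show ((4:Int) + 1) = 5 by norm_num]
    rw [show (16:Nat) = 15 + 1 from rfl, step, dval5 y L hL h01, if_pos (by omega)]
    rw [show ((5:Int) + 1) = 6 by norm_num]
    rw [show (15:Nat) = 14 + 1 from rfl, step, dval6 y L hL h01, if_pos (by omega)]
    rw [show ((6:Int) + 1) = 7 by norm_num]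
    rw [show (14:Nat) = 13 + 1 from rfl, step, dval7 y L hL h01, if_pos (by omega)]
    rw [show ((7:Int) + 1) = 8 by norm_num]
    rw [show (13:Nat) = 12 + 1 from rfl, step, dval8 y L hL h01, if_pos (by omega)]
    rw [show ((8:Int) + 1) = 9 by norm_num]
    rw [show (12:Nat) = 11 + 1 from rfl, step, dval9 y L hL h01, if_pos (by omega)]
    rw [show ((9:Int) + 1) = 10 by norm_num]
    rw [show (11:Nat) = 10 + 1 from rfl, step, dval10 y L hL h01, if_pos (by omega)]
    rw [show ((10:Int) + 1) = 11 by norm_num]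
    rw [show (10:Nat) = 9 + 1 from rfl, step, dval11 y L hL h01, if_neg (by omega)]
  have hw : b_walk [31, 28 + L, 31, 30, 31, 30, 31, 31, 30, 31, 30, 31] 1 dd = (10, dd - (273 + L)) := by
    rw [b_walk, if_neg (by omega), b_walk, if_neg (by omega), b_walk, if_neg (by omega), b_walk, if_neg (by omega), b_walk, if_neg (by omega), b_walk, if_neg (by omega), b_walk, if_neg (by omega), b_walk, if_neg (by omega), b_walk, if_neg (by omega), b_walk, if_pos (by omega)]
    all_goals simp only [Prod.mk.injEq, true_and, and_true]
    all_goals omega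
  rw [hrun, hw, show ((11:Int) - 1) = 10 by norm_num, fin_eq date y dd 10 hdate, dval10 y L hL h01]
  simp only [Prod.mk.injEq, true_and, and_true]
  omega

set_option maxHeartbeats 1000000 in
theorem a2g_case11 (date y dd L : Int) (hL : gregorian_leap_year_p y = L)
    (h01 : L = 0 ∨ L = 1) (h1 : 1 ≤ dd) (h2 : dd ≤ 365)
    (hdate : date = gregorian_to_absolute y 1 1 + dd - 1)
    (hlo : 305 + L ≤ dd) (hhi : dd < 335 + L) :
    ((a2g_loop date y 20 1 - 1),
      (date - gregorian_to_absolute y (a2g_loop date y 20 1 - 1) 1 + 1)) =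
    b_walk [31, 28 + L, 31, 30, 31, 30, 31, 31, 30, 31, 30, 31] 1 dd := by
  have step := loop_step date y dd hdate
  have hrun : a2g_loop date y 20 1 = 12 := by
    rw [show (20:Nat) = 19 + 1 from rfl, step, dval1 y L hL h01, if_pos (by omega)]
    rw [show ((1:Int) + 1) = 2 by norm_num]
    rw [show (19:Nat) = 18 + 1 from rfl, step, dval2 y L hL h01, if_pos (by omega)]
    rw [show ((2:Int) + 1) = 3 by norm_num]
    rw [show (18:Nat) = 17 + 1 from rfl, step, dval3 y L hL h01, if_pos (by omega)]
    rw [show ((3:Int) + 1) = 4 by norm_num]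
    rw [show (17:Nat) = 16 + 1 from rfl, step, dval4 y L hL h01, if_pos (by omega)]
    rw [show ((4:Int) + 1) = 5 by norm_num]
    rw [show (16:Nat) = 15 + 1 from rfl, step, dval5 y L hL h01, if_pos (by omega)]
    rw [show ((5:Int) + 1) = 6 by norm_num]
    rw [show (15:Nat) = 14 + 1 from rfl, step, dval6 y L hL h01, if_pos (by omega)]
    rw [show ((6:Int) + 1) = 7 by norm_num]
    rw [show (14:Nat) = 13 + 1 from rfl, step, dval7 y L hL h01, if_pos (by omega)]
    rw [show ((7:Int) + 1) = 8 by norm_num]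
    rw [show (13:Nat) = 12 + 1 from rfl, step, dval8 y L hL h01, if_pos (by omega)]
    rw [show ((8:Int) + 1) = 9 by norm_num]
    rw [show (12:Nat) = 11 + 1 from rfl, step, dval9 y L hL h01, if_pos (by omega)]
    rw [show ((9:Int) + 1) = 10 by norm_num]
    rw [show (11:Nat) = 10 + 1 from rfl, step, dval10 y L hL h01, if_pos (by omega)]
    rw [show ((10:Int) + 1) = 11 by norm_num]
    rw [show (10:Nat) = 9 + 1 from rfl, step, dval11 y L hL h01, if_pos (by omega)]
    rw [show ((11:Int) + 1) = 12 by norm_num]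
    rw [show (9:Nat) = 8 + 1 from rfl, step, dval12 y L hL h01, if_neg (by omega)]
  have hw : b_walk [31, 28 + L, 31, 30, 31, 30, 31, 31, 30, 31, 30, 31] 1 dd = (11, dd - (304 + L)) := by
    rw [b_walk, if_neg (by omega), b_walk, if_neg (by omega), b_walk, if_neg (by omega), b_walk, if_neg (by omega), b_walk, if_neg (by omega), b_walk, if_neg (by omega), b_walk, if_neg (by omega), b_walk, if_neg (by omega), b_walk, if_neg (by omega), b_walk, if_neg (by omega), b_walk, if_pos (by omega)]
    all_goals simp only [Prod.mk.injEq, true_and, and_true]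
    all_goals omega
  rw [hrun, hw, show ((12:Int) - 1) = 11 by norm_num, fin_eq date y dd 11 hdate, dval11 y L hL h01]
  simp only [Prod.mk.injEq, true_and, and_true]
  omega

set_option maxHeartbeats 1000000 in
theorem a2g_case12 (date y dd L : Int) (hL : gregorian_leap_year_p y = L)
    (h01 : L = 0 ∨ L = 1) (h1 : 1 ≤ dd) (h2 : dd ≤ 365)
    (hdate : date = gregorian_to_absolute y 1 1 + dd - 1)
    (hlo : 335 + L ≤ dd) :
    ((a2g_loop date y 20 1 - 1),
      (date - gregorian_to_absolute y (a2g_loop date y 20 1 - 1) 1 + 1)) =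
    b_walk [31, 28 + L, 31, 30, 31, 30, 31, 31, 30, 31, 30, 31] 1 dd := by
  have step := loop_step date y dd hdate
  have hrun : a2g_loop date y 20 1 = 13 := by
    rw [show (20:Nat) = 19 + 1 from rfl, step, dval1 y L hL h01, if_pos (by omega)]
    rw [show ((1:Int) + 1) = 2 by norm_num]
    rw [show (19:Nat) = 18 + 1 from rfl, step, dval2 y L hL h01, if_pos (by omega)]
    rw [show ((2:Int) + 1) = 3 by norm_num]
    rw [show (18:Nat) = 17 + 1 from rfl, step, dval3 y L hL h01, if_pos (by omega)]
    rw [show ((3:Int) + 1) = 4 by norm_num]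
    rw [show (17:Nat) = 16 + 1 from rfl, step, dval4 y L hL h01, if_pos (by omega)]
    rw [show ((4:Int) + 1) = 5 by norm_num]
    rw [show (16:Nat) = 15 + 1 from rfl, step, dval5 y L hL h01, if_pos (by omega)]
    rw [show ((5:Int) + 1) = 6 by norm_num]
    rw [show (15:Nat) = 14 + 1 from rfl, step, dval6 y L hL h01, if_pos (by omega)]
    rw [show ((6:Int) + 1) = 7 by norm_num]
    rw [show (14:Nat) = 13 + 1 from rfl, step, dval7 y L hL h01, if_pos (by omega)]
    rw [show ((7:Int) + 1) = 8 by norm_num]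
    rw [show (13:Nat) = 12 + 1 from rfl, step, dval8 y L hL h01, if_pos (by omega)]
    rw [show ((8:Int) + 1) = 9 by norm_num]
    rw [show (12:Nat) = 11 + 1 from rfl, step, dval9 y L hL h01, if_pos (by omega)]
    rw [show ((9:Int) + 1) = 10 by norm_num]
    rw [show (11:Nat) = 10 + 1 from rfl, step, dval10 y L hL h01, if_pos (by omega)]
    rw [show ((10:Int) + 1) = 11 by norm_num]
    rw [show (10:Nat) = 9 + 1 from rfl, step, dval11 y L hL h01, if_pos (by omega)]
    rw [show ((11:Int) + 1) = 12 by norm_num]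
    rw [show (9:Nat) = 8 + 1 from rfl, step, dval12 y L hL h01, if_pos (by omega)]
    rw [show ((12:Int) + 1) = 13 by norm_num]
    rw [show (8:Nat) = 7 + 1 from rfl, step, dval13 y L hL h01, if_neg (by omega)]
  have hw : b_walk [31, 28 + L, 31, 30, 31, 30, 31, 31, 30, 31, 30, 31] 1 dd = (12, dd - (334 + L)) := by
    rw [b_walk, if_neg (by omega), b_walk, if_neg (by omega), b_walk, if_neg (by omega), b_walk, if_neg (by omega), b_walk, if_neg (by omega), b_walk, if_neg (by omega), b_walk, if_neg (by omega), b_walk, if_neg (by omega), b_walk, if_neg (by omega), b_walk, if_neg (by omega), b_walk, if_neg (by omega), b_walk, if_pos (by omega)]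
    all_goals simp only [Prod.mk.injEq, true_and, and_true]
    all_goals omega
  rw [hrun, hw, show ((13:Int) - 1) = 12 by norm_num, fin_eq date y dd 12 hdate, dval12 y L hL h01]
  simp only [Prod.mk.injEq, true_and, and_true]
  omega

theorem a2g_loop_walk (date y dd L : Int) (hL : gregorian_leap_year_p y = L)
    (h01 : L = 0 ∨ L = 1) (h1 : 1 ≤ dd) (h2 : dd ≤ 365)
    (hdate : date = gregorian_to_absolute y 1 1 + dd - 1) :
    ((a2g_loop date y 20 1 - 1),
      (date - gregorian_to_absolute y (a2g_loop date y 20 1 - 1) 1 + 1)) =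
    b_walk [31, 28 + L, 31, 30, 31, 30, 31, 31, 30, 31, 30, 31] 1 dd := by
  have hcase : dd < 32 ∨ (32 ≤ dd ∧ dd < 60 + L) ∨ (60 + L ≤ dd ∧ dd < 91 + L) ∨ (91 + L ≤ dd ∧ dd < 121 + L) ∨ (121 + L ≤ dd ∧ dd < 152 + L) ∨ (152 + L ≤ dd ∧ dd < 182 + L) ∨ (182 + L ≤ dd ∧ dd < 213 + L) ∨ (213 + L ≤ dd ∧ dd < 244 + L) ∨ (244 + L ≤ dd ∧ dd < 274 + L) ∨ (274 + L ≤ dd ∧ dd < 305 + L) ∨ (305 + L ≤ dd ∧ dd < 335 + L) ∨ 335 + L ≤ dd := by omega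
  rcases hcase with hk | hk | hk | hk | hk | hk | hk | hk | hk | hk | hk | hk
  · exact a2g_case1 date y dd L hL h01 h1 h2 hdate hk
  · exact a2g_case2 date y dd L hL h01 h1 h2 hdate hk.1 hk.2
  · exact a2g_case3 date y dd L hL h01 h1 h2 hdate hk.1 hk.2
  · exact a2g_case4 date y dd L hL h01 h1 h2 hdate hk.1 hk.2
  · exact a2g_case5 date y dd L hL h01 h1 h2 hdate hk.1 hk.2
  · exact a2g_case6 date y dd L hL h01 h1 h2 hdate hk.1 hk.2
  · exact a2g_case7 date y dd L hL h01 h1 h2 hdate hk.1 hk.2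
  · exact a2g_case8 date y dd L hL h01 h1 h2 hdate hk.1 hk.2
  · exact a2g_case9 date y dd L hL h01 h1 h2 hdate hk.1 hk.2
  · exact a2g_case10 date y dd L hL h01 h1 h2 hdate hk.1 hk.2
  · exact a2g_case11 date y dd L hL h01 h1 h2 hdate hk.1 hk.2
  · exact a2g_case12 date y dd L hL h01 h1 h2 hdate hk

set_option maxHeartbeats 1000000 in
theorem a2g_main (date : Int) : absolute_to_gregorian date = absolute_to_gregorian_alt date := by
  have F1 : ∀ a : Int, PySem.Int.floordiv a 146097 = a / 146097 := fun a => PySem.Int.floordiv_eq_ediv_of_pos (by norm_num)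
  have M1 : ∀ a : Int, PySem.Int.mod a 146097 = a % 146097 := fun a => PySem.Int.mod_eq_emod_of_pos (by norm_num)
  have F2 : ∀ a : Int, PySem.Int.floordiv a 36524 = a / 36524 := fun a => PySem.Int.floordiv_eq_ediv_of_pos (by norm_num)
  have M2 : ∀ a : Int, PySem.Int.mod a 36524 = a % 36524 := fun a => PySem.Int.mod_eq_emod_of_pos (by norm_num)
  have F3 : ∀ a : Int, PySem.Int.floordiv a 1461 = a / 1461 := fun a => PySem.Int.floordiv_eq_ediv_of_pos (by norm_num)
  have M3 : ∀ a : Int, PySem.Int.mod a 1461 = a % 1461 := fun a => PySem.Int.mod_eq_emod_of_pos (by norm_num)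
  have F4 : ∀ a : Int, PySem.Int.floordiv a 365 = a / 365 := fun a => PySem.Int.floordiv_eq_ediv_of_pos (by norm_num)
  have M4 : ∀ a : Int, PySem.Int.mod a 365 = a % 365 := fun a => PySem.Int.mod_eq_emod_of_pos (by norm_num)
  unfold absolute_to_gregorian absolute_to_gregorian_alt
  simp only [F1, M1, F2, M2, F3, M3, F4, M4]
  split_ifs with h
  · rfl
  · rename_i hleap
    set Y := 400 * ((date - 1) / 146097) + 100 * ((date - 1) % 146097 / 36524) + 4 * ((date - 1) % 146097 % 36524 / 1461) + (date - 1) % 146097 % 36524 % 1461 / 365 + 1 with hY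
    set dd := (date - 1) % 146097 % 36524 % 1461 % 365 + 1 with hdd
    have hL : gregorian_leap_year_p Y = 1 := by
      unfold gregorian_leap_year_p
      rw [if_pos (of_decide_eq_true hleap)]
    have hg : gregorian_to_absolute Y 1 1 = 365 * (Y - 1) + (Y - 1) / 4 - (Y - 1) / 100 + (Y - 1) / 400 + 1 := by
      unfold gregorian_to_absolute gregorian_day_number
      rw [if_pos (by norm_num : (1:Int) < 3)]
      simp only [Int.shiftRight_eq_div_pow]
      rw [PySem.Int.floordiv_eq_ediv_of_pos (show (0:Int) < 100 by norm_num),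
          PySem.Int.floordiv_eq_ediv_of_pos (show (0:Int) < 400 by norm_num)]
      norm_num
      omega
    have hq4 : (Y - 1) / 4 = 100 * ((date - 1) / 146097) + 25 * ((date - 1) % 146097 / 36524) + (date - 1) % 146097 % 36524 / 1461 := by
      rw [hY]; omega
    have hq100 : (Y - 1) / 100 = 4 * ((date - 1) / 146097) + (date - 1) % 146097 / 36524 := by
      rw [hY]; omega
    have hq400 : (Y - 1) / 400 = (date - 1) / 146097 := by
      rw [hY]; omega
    have hdate : date = gregorian_to_absolute Y 1 1 + dd - 1 := by
      rw [hg, hq4, hq100, hq400, hY, hdd]; omega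
    have hd1 : 1 ≤ dd := by rw [hdd]; omega
    have hd2 : dd ≤ 365 := by rw [hdd]; omega
    have hwalk := a2g_loop_walk date Y dd 1 hL (Or.inr rfl) hd1 hd2 hdate
    rw [show (28 + (1:Int)) = 29 by norm_num] at hwalk
    exact congrArg (Prod.mk Y) (hwalk.trans Prod.mk.eta.symm)
  · rename_i hleap
    set Y := 400 * ((date - 1) / 146097) + 100 * ((date - 1) % 146097 / 36524) + 4 * ((date - 1) % 146097 % 36524 / 1461) + (date - 1) % 146097 % 36524 % 1461 / 365 + 1 with hY
    set dd := (date - 1) % 146097 % 36524 % 1461 % 365 + 1 with hdd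
    have hL : gregorian_leap_year_p Y = 0 := by
      unfold gregorian_leap_year_p
      rw [if_neg (fun hp => hleap (decide_eq_true hp))]
    have hg : gregorian_to_absolute Y 1 1 = 365 * (Y - 1) + (Y - 1) / 4 - (Y - 1) / 100 + (Y - 1) / 400 + 1 := by
      unfold gregorian_to_absolute gregorian_day_number
      rw [if_pos (by norm_num : (1:Int) < 3)]
      simp only [Int.shiftRight_eq_div_pow]
      rw [PySem.Int.floordiv_eq_ediv_of_pos (show (0:Int) < 100 by norm_num),
          PySem.Int.floordiv_eq_ediv_of_pos (show (0:Int) < 400 by norm_num)]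
      norm_num
      omega
    have hq4 : (Y - 1) / 4 = 100 * ((date - 1) / 146097) + 25 * ((date - 1) % 146097 / 36524) + (date - 1) % 146097 % 36524 / 1461 := by
      rw [hY]; omega
    have hq100 : (Y - 1) / 100 = 4 * ((date - 1) / 146097) + (date - 1) % 146097 / 36524 := by
      rw [hY]; omega
    have hq400 : (Y - 1) / 400 = (date - 1) / 146097 := by
      rw [hY]; omega
    have hdate : date = gregorian_to_absolute Y 1 1 + dd - 1 := by
      rw [hg, hq4, hq100, hq400, hY, hdd]; omega
    have hd1 : 1 ≤ dd := by rw [hdd]; omega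
    have hd2 : dd ≤ 365 := by rw [hdd]; omega
    have hwalk := a2g_loop_walk date Y dd 0 hL (Or.inl rfl) hd1 hd2 hdate
    rw [show (28 + (0:Int)) = 28 by norm_num] at hwalk
    exact congrArg (Prod.mk Y) (hwalk.trans Prod.mk.eta.symm)

-- ===== VERDICT (by name: the statement is the Claim_ definition above) =====
theorem absolute_to_gregorian_spec : Claim_equal_absolute_to_gregorian := by
  intro date _
  unfold Spec_absolute_to_gregorian
  exact a2g_main date
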